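-- pv_equiv track=rewrite | github.com/JouJoy77/test003 | test003t1.py | generate_lucky_tickets
-- ===== SOURCE A (Python) =====
-- LEN_OF_TICKET_NUMBER = 6
--
-- def sum_of_digits(n):
--     """Get the sum of the digits of a number."""
--     if n < 10:
--         return n
--     else:
--         return n % 10 + sum_of_digits(n // 10)
--
-- def is_lucky(num):
--     """Check if the ticket is lucky."""
--     first_part = num // 1000
--     second_part = num % 1000
--     return sum_of_digits(first_part) == sum_of_digits(second_part)
--
-- def generate_lucky_tickets(N):
--     """Generate the first N lucky tickets."""
--     tickets = []
--     for num in range(1001, 1000000):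
--         if is_lucky(num):
--             N -= 1
--             num_as_str = str(num)
--             num_as_str = ''.join(
--                 ['0' for _ in range(LEN_OF_TICKET_NUMBER -
--                                     len(num_as_str))]+list(num_as_str)
--             )
--             tickets.append(num_as_str)
--         if N == 0:
--             break
--     return tickets
-- ===== SOURCE B (Python) =====
-- LEN_OF_TICKET_NUMBER = 6
--
-- def _digit_sum3(v):
--     """Digit sum of a three-digit value 0..999, by a closed formula."""
--     return v // 100 + v // 10 % 10 + v % 10
--
-- def generate_lucky_tickets(N):
--     """Generate the first N lucky tickets by pairing three-digit halves of equal digit sum."""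
--     buckets = {d: [s for s in range(1000) if _digit_sum3(s) == d] for d in range(28)}
--     tickets = []
--     for p in range(1000):
--         for s in buckets[_digit_sum3(p)]:
--             num = p * 1000 + s
--             if num == 0:
--                 continue
--             tickets.append(f"{num:0{LEN_OF_TICKET_NUMBER}d}")
--             N -= 1
--             if N == 0:
--                 return tickets
--     return tickets
-- ===== Notes on version B (the rewrite author's own statement) =====
-- stated objective: faster
-- what changed: Instead of scanning every six-digit candidate and testing each with a recursive digit sum, B precomputes buckets of the three-digit halves keyed by digit sum and directly generates each lucky ticket by pairing every prefix with the equal-digit-sum suffixes in ascending order, skipping only the all-zero ticket.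
import Mathlib
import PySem

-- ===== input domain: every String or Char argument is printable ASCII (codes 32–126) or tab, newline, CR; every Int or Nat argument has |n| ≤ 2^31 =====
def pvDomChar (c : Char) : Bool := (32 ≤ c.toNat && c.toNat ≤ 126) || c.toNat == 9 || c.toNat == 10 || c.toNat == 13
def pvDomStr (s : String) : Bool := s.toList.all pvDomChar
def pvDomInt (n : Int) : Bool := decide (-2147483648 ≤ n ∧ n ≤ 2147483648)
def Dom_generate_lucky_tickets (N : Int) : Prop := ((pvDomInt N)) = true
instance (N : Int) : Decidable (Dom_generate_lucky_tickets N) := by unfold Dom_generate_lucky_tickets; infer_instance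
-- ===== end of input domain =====

-- B replaces A's scan of all 10^6 numbers by direct generation: it buckets the three-digit halves
-- by digit sum and pairs equal-sum halves in ascending order (objective: faster, constant-factor).

-- ===== PORT A =====

def LEN_OF_TICKET_NUMBER : Int := 6

-- sum_of_digits: A's recursion on n // 10; the Nat fuel only makes the same computation
-- total (n.toNat + 1 steps always suffice: n // 10 strictly decreases while n ≥ 10).
def sod_fuel : Nat → Int → Int
  | 0, n => n
  | fuel + 1, n =>
    if n < 10 then n else PySem.Int.mod n 10 + sod_fuel fuel (PySem.Int.floordiv n 10)

def sum_of_digits (n : Int) : Int := sod_fuel (n.toNat + 1) n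

def is_lucky (num : Int) : Bool :=
  sum_of_digits (PySem.Int.floordiv num 1000) == sum_of_digits (PySem.Int.mod num 1000)

-- ''.join(['0' for _ in range(LEN_OF_TICKET_NUMBER - len(s))] + list(s))
def a_pad (num : Int) : String :=
  let s := PySem.Int.toChars num
  String.ofList (((PySem.List.pyRange 0 (LEN_OF_TICKET_NUMBER - (s.length : Int)) 1).map
      (fun _ => '0')) ++ s)

-- the 'for num in range(1001, 1000000)' loop with its break
def aLoop : List Int → Int → List String → List String
  | [], _, tickets => tickets
  | num :: rest, n, tickets =>
    if is_lucky num then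
      let tickets' := tickets ++ [a_pad num]
      if n - 1 == 0 then tickets' else aLoop rest (n - 1) tickets'
    else
      if n == 0 then tickets else aLoop rest n tickets

def generate_lucky_tickets (N : Int) : List String :=
  aLoop (PySem.List.pyRange 1001 1000000 1) N []

-- ===== PORT B =====

def digit_sum3 (v : Int) : Int :=
  PySem.Int.floordiv v 100 + PySem.Int.mod (PySem.Int.floordiv v 10) 10 + PySem.Int.mod v 10

-- {d: [s for s in range(1000) if _digit_sum3(s) == d] for d in range(28)}
def bBuckets : PySem.Dict Int (List Int) :=
  (PySem.List.pyRange 0 28 1).foldl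
    (fun d k =>
      d.insert k ((PySem.List.pyRange 0 1000 1).filter (fun s => digit_sum3 s == k)))
    PySem.Dict.empty

-- f"{num:06d}"; exact for num ≥ 0 (B only formats positive nums)
def b_pad (num : Int) : String :=
  let s := PySem.Int.toChars num
  String.ofList (List.replicate (6 - s.length) '0' ++ s)

-- the inner 'for s in buckets[...]' loop; the Bool records the early 'return tickets'
def bInner : List Int → Int → Int → List String → (List String × Int × Bool)
  | [], n, _, tickets => (tickets, n, false)
  | s :: rest, n, p, tickets =>
    let num := p * 1000 + s
    if num == 0 then bInner rest n p tickets
    else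
      let tickets' := tickets ++ [b_pad num]
      if n - 1 == 0 then (tickets', n - 1, true) else bInner rest (n - 1) p tickets'

-- the outer 'for p in range(1000)' loop; buckets[_digit_sum3(p)] always hits a key
def bOuter : List Int → Int → List String → List String
  | [], _, tickets => tickets
  | p :: ps, n, tickets =>
    let r := bInner (bBuckets.getD (digit_sum3 p) []) n p tickets
    if r.2.2 then r.1 else bOuter ps r.2.1 r.1

def generate_lucky_tickets_alt (N : Int) : List String :=
  bOuter (PySem.List.pyRange 0 1000 1) N []

-- ===== PRECONDITION & SPEC =====
def Spec_generate_lucky_tickets (N : Int) (out : List String) : Prop := out = generate_lucky_tickets_alt N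
instance (N : Int) (out : List String) : Decidable (Spec_generate_lucky_tickets N out) := by unfold Spec_generate_lucky_tickets; infer_instance

-- ===== CLAIM (what is proved, stated in full; the proofs are below) =====
def Claim_equal_generate_lucky_tickets : Prop := ∀ (N : Int), Dom_generate_lucky_tickets N → Spec_generate_lucky_tickets N (generate_lucky_tickets N)

-- ===== LEMMAS AND PROOFS =====

theorem pad_eq (n : Int) : a_pad n = b_pad n := by
  have h : ((LEN_OF_TICKET_NUMBER - ((PySem.Int.toChars n).length : Int))).toNat
      = 6 - (PySem.Int.toChars n).length := by
    simp only [LEN_OF_TICKET_NUMBER]; omega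
  simp [a_pad, b_pad, PySem.List.pyRange_zero, List.map_map, Function.comp_def,
    List.map_const', h]

-- the common "append / decrement / break when the counter hits 0" loop both programs run,
-- applied to the stream of lucky numbers each enumerates
def consume : List Int → Int → List String → (List String × Int × Bool)
  | [], n, acc => (acc, n, false)
  | m :: rest, n, acc =>
    let acc' := acc ++ [b_pad m]
    if n - 1 == 0 then (acc', n - 1, true) else consume rest (n - 1) acc'

theorem aLoop_eq_consume : ∀ (nums : List Int) (n : Int) (acc : List String), n ≠ 0 →
    aLoop nums n acc = (consume (nums.filter is_lucky) n acc).1 := by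
  intro nums
  induction nums with
  | nil => intro n acc _; simp [aLoop, consume]
  | cons num rest ih =>
    intro n acc hn
    by_cases h : is_lucky num
    · rw [List.filter_cons_of_pos h]
      by_cases hb : n - 1 = 0
      · simp [aLoop, consume, h, hb, pad_eq]
      · simp only [aLoop, consume, h, if_true, beq_iff_eq, hb, if_false, pad_eq]
        exact ih (n - 1) (acc ++ [b_pad num]) hb
    · rw [List.filter_cons_of_neg h]
      simp only [aLoop, h, if_false, beq_iff_eq, hn]
      exact ih n acc hn

theorem bInner_eq_consume : ∀ (ss : List Int) (n p : Int) (acc : List String),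
    bInner ss n p acc
      = consume ((ss.map (fun s => p * 1000 + s)).filter (fun m => !(m == 0))) n acc := by
  intro ss
  induction ss with
  | nil => intro n p acc; simp [bInner, consume]
  | cons s rest ih =>
    intro n p acc
    by_cases h0 : p * 1000 + s = 0
    · simp only [bInner, List.map_cons, List.filter_cons, h0]
      simp [ih]
    · simp only [bInner, List.map_cons, List.filter_cons]
      by_cases hb : n - 1 = 0
      · simp [h0, hb, consume]
      · simp [h0, hb, consume, ih]

theorem consume_append : ∀ (xs ys : List Int) (n : Int) (acc : List String),
    consume (xs ++ ys) n acc
      = if (consume xs n acc).2.2 then consume xs n acc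
        else consume ys (consume xs n acc).2.1 (consume xs n acc).1 := by
  intro xs
  induction xs with
  | nil => intro ys n acc; simp [consume]
  | cons m rest ih =>
    intro ys n acc
    by_cases hb : n - 1 = 0
    · simp [consume, hb]
    · simp only [List.cons_append, consume, beq_iff_eq, hb, if_false]
      exact ih ys (n - 1) (acc ++ [b_pad m])

def bStream : List Int :=
  (PySem.List.pyRange 0 1000 1).flatMap
    (fun p => ((bBuckets.getD (digit_sum3 p) []).map (fun s => p * 1000 + s)).filter
      (fun m => !(m == 0)))

theorem bOuter_eq_consume : ∀ (ps : List Int) (n : Int) (acc : List String),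
    bOuter ps n acc
      = (consume (ps.flatMap
          (fun p => ((bBuckets.getD (digit_sum3 p) []).map (fun s => p * 1000 + s)).filter
            (fun m => !(m == 0)))) n acc).1 := by
  intro ps
  induction ps with
  | nil => intro n acc; simp [bOuter, consume]
  | cons p rest ih =>
    intro n acc
    rw [List.flatMap_cons, consume_append]
    simp only [bOuter, bInner_eq_consume]
    by_cases hd : (consume (((bBuckets.getD (digit_sum3 p) []).map (fun s => p * 1000 + s)).filter
        (fun m => !(m == 0))) n acc).2.2
    · simp [hd]
    · simp [hd, ih]

-- finite facts, checked by kernel computation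
set_option maxRecDepth 40000 in
theorem lucky_low : (PySem.List.pyRange 0 1001 1).filter is_lucky = [0] := by decide

set_option maxRecDepth 40000 in
theorem bucket_all : ((PySem.List.pyRange 0 28 1).all (fun d =>
    bBuckets.getD d [] == (PySem.List.pyRange 0 1000 1).filter (fun s => digit_sum3 s == d))) = true := by decide

set_option maxRecDepth 40000 in
theorem sod_ds3_all : ((PySem.List.pyRange 0 1000 1).all
    (fun v => sum_of_digits v == digit_sum3 v)) = true := by decide

set_option maxRecDepth 40000 in
theorem lucky_p0 : (PySem.List.pyRange 0 1000 1).filter (fun s => is_lucky (0 * 1000 + s)) = [0] := by decide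

set_option maxRecDepth 40000 in
theorem bchunk_p0 : ((bBuckets.getD (digit_sum3 0) []).map (fun s => 0 * 1000 + s)).filter
    (fun m => !(m == 0)) = [] := by decide

theorem bucket_eq (d : Int) (h0 : 0 ≤ d) (h1 : d < 28) :
    bBuckets.getD d [] = (PySem.List.pyRange 0 1000 1).filter (fun s => digit_sum3 s == d) := by
  have := List.all_eq_true.mp bucket_all d (PySem.List.mem_pyRange_one.mpr ⟨h0, h1⟩)
  exact beq_iff_eq.mp this

theorem sod_eq_ds3 (v : Int) (h0 : 0 ≤ v) (h1 : v < 1000) :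
    sum_of_digits v = digit_sum3 v := by
  have := List.all_eq_true.mp sod_ds3_all v (PySem.List.mem_pyRange_one.mpr ⟨h0, h1⟩)
  exact beq_iff_eq.mp this

theorem ds3_bounds (p : Int) (h0 : 0 ≤ p) (h1 : p < 1000) :
    0 ≤ digit_sum3 p ∧ digit_sum3 p < 28 := by
  have e : PySem.Int.floordiv p 100 < 10 :=
    (PySem.Int.floordiv_lt_iff_lt_mul (by norm_num)).mpr (by omega)
  have e0 : 0 ≤ PySem.Int.floordiv p 100 :=
    (PySem.Int.le_floordiv_iff_mul_le (by norm_num)).mpr (by omega)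
  have m1 : 0 ≤ PySem.Int.mod (PySem.Int.floordiv p 10) 10 := PySem.Int.mod_nonneg _ (by norm_num)
  have m2 : PySem.Int.mod (PySem.Int.floordiv p 10) 10 < 10 := PySem.Int.mod_lt _ (by norm_num)
  have m3 : 0 ≤ PySem.Int.mod p 10 := PySem.Int.mod_nonneg _ (by norm_num)
  have m4 : PySem.Int.mod p 10 < 10 := PySem.Int.mod_lt _ (by norm_num)
  unfold digit_sum3; omega

theorem lucky_split (p s : Int) (_hp : 0 ≤ p) (hs0 : 0 ≤ s) (hs : s < 1000) :
    is_lucky (p * 1000 + s) = (sum_of_digits p == sum_of_digits s) := by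
  have hq : PySem.Int.floordiv (p * 1000 + s) 1000 = p :=
    (PySem.Int.floordiv_eq_iff_of_pos (by norm_num)).mpr (by constructor <;> nlinarith)
  have hm : PySem.Int.mod (p * 1000 + s) 1000 = s := by
    have := PySem.Int.floordiv_mul_add_mod (p * 1000 + s) 1000
    rw [hq] at this; omega
  unfold is_lucky
  rw [hq, hm]

theorem range_mul (a b : Nat) :
    List.range (a * b) = (List.range a).flatMap (fun p => (List.range b).map (fun s => p * b + s)) := by
  induction a with
  | zero => simp
  | succ a ih =>
    rw [Nat.succ_mul, List.range_add, List.range_succ, List.flatMap_append, ih]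
    simp [Nat.add_comm]

theorem prod_decomp :
    PySem.List.pyRange 0 1000000 1
      = (PySem.List.pyRange 0 1000 1).flatMap
          (fun p => (PySem.List.pyRange 0 1000 1).map (fun s => p * 1000 + s)) := by
  rw [PySem.List.pyRange_zero, PySem.List.pyRange_zero]
  have h6 : (1000000 : Int).toNat = 1000 * 1000 := by decide
  have h3 : (1000 : Int).toNat = 1000 := by decide
  rw [h6, h3, range_mul]
  simp only [List.map_flatMap, List.flatMap_map, List.map_map]
  apply List.flatMap_congr
  intro p _
  apply List.map_congr_left
  intro s _
  simp only [Function.comp_apply]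
  push_cast
  ring

-- B's per-prefix chunk and A's per-prefix chunk of the full product range
def gA (p : Int) : List Int :=
  ((PySem.List.pyRange 0 1000 1).filter (fun s => is_lucky (p * 1000 + s))).map
    (fun s => p * 1000 + s)

def gB (p : Int) : List Int :=
  ((bBuckets.getD (digit_sum3 p) []).map (fun s => p * 1000 + s)).filter (fun m => !(m == 0))

theorem fullprod : (PySem.List.pyRange 0 1000000 1).filter is_lucky
    = (PySem.List.pyRange 0 1000 1).flatMap gA := by
  rw [prod_decomp, List.filter_flatMap]
  apply List.flatMap_congr
  intro p _
  rw [List.filter_map]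
  rfl

theorem gB_eq_gA (p : Int) (hp : p ∈ PySem.List.pyRange 1 1000 1) : gB p = gA p := by
  obtain ⟨hp1, hp2⟩ := PySem.List.mem_pyRange_one.mp hp
  clear hp
  unfold gB gA
  rw [bucket_eq _ (ds3_bounds p (by omega) hp2).1 (ds3_bounds p (by omega) hp2).2]
  have hall : ∀ m ∈ (((PySem.List.pyRange 0 1000 1).filter
      (fun s => digit_sum3 s == digit_sum3 p)).map (fun s => p * 1000 + s)),
      (!(m == 0)) = true := by
    intro m hm
    obtain ⟨s, hsmem, rfl⟩ := List.mem_map.mp hm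
    obtain ⟨hs0, _⟩ := PySem.List.mem_pyRange_one.mp (List.mem_of_mem_filter hsmem)
    have : p * 1000 + s ≠ 0 := by omega
    simpa using this
  rw [List.filter_eq_self.mpr hall]
  have hfilter : (PySem.List.pyRange 0 1000 1).filter (fun s => digit_sum3 s == digit_sum3 p)
      = (PySem.List.pyRange 0 1000 1).filter (fun s => is_lucky (p * 1000 + s)) := by
    apply List.filter_congr
    intro s hs
    obtain ⟨hs0, hs1⟩ := PySem.List.mem_pyRange_one.mp hs
    rw [lucky_split p s (by omega) hs0 hs1, sod_eq_ds3 p (by omega) hp2, sod_eq_ds3 s hs0 hs1]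
    exact Bool.beq_comm
  rw [hfilter]

theorem core : (PySem.List.pyRange 1001 1000000 1).filter is_lucky = bStream := by
  have full : (PySem.List.pyRange 0 1000000 1).filter is_lucky
      = 0 :: (PySem.List.pyRange 1001 1000000 1).filter is_lucky := by
    rw [PySem.List.pyRange_one_append 0 1001 1000000 (by norm_num) (by norm_num),
      List.filter_append, lucky_low]
    rfl
  have hR : PySem.List.pyRange 0 1000 1 = 0 :: PySem.List.pyRange 1 1000 1 :=
    PySem.List.pyRange_one_cons (by norm_num)
  have hA0 : gA 0 = [0] := by
    unfold gA
    rw [lucky_p0]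
    norm_num
  have hfull2 : (PySem.List.pyRange 0 1000000 1).filter is_lucky
      = [0] ++ (PySem.List.pyRange 1 1000 1).flatMap gA := by
    rw [fullprod, hR, List.flatMap_cons, hA0]
  have hstream : bStream = (PySem.List.pyRange 1 1000 1).flatMap gA := by
    show (PySem.List.pyRange 0 1000 1).flatMap gB = _
    rw [hR, List.flatMap_cons]
    have : gB 0 = [] := bchunk_p0
    rw [this, List.nil_append]
    exact List.flatMap_congr gB_eq_gA
  rw [hstream]
  have h := full.symm.trans hfull2
  simp only [List.singleton_append] at h
  injection h


theorem alt_eq_consume (N : Int) : generate_lucky_tickets_alt N = (consume bStream N []).1 := by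
  unfold generate_lucky_tickets_alt bStream
  exact bOuter_eq_consume _ _ _

theorem gen_zero : generate_lucky_tickets 0 = (consume bStream 0 []).1 := by
  have h1001 : PySem.List.pyRange 1001 1000000 1 = 1001 :: PySem.List.pyRange 1002 1000000 1 :=
    PySem.List.pyRange_one_cons (by norm_num)
  have lucky1001 : is_lucky 1001 = true := by decide
  have hm1 : ((0 : Int) - 1 == 0) = false := by decide
  unfold generate_lucky_tickets
  rw [← core, h1001, List.filter_cons_of_pos lucky1001]
  simp only [aLoop, consume, lucky1001, if_true, hm1, Bool.false_eq_true, if_false]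
  rw [pad_eq, aLoop_eq_consume _ _ _ (by norm_num)]

-- ===== VERDICT (by name: the statement is the Claim_ definition above) =====
theorem generate_lucky_tickets_spec : Claim_equal_generate_lucky_tickets := by
  intro N _
  unfold Spec_generate_lucky_tickets
  rw [alt_eq_consume]
  by_cases hN : N = 0
  · subst hN; exact gen_zero
  · unfold generate_lucky_tickets
    rw [aLoop_eq_consume _ _ _ hN, core]
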